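-- pv_equiv track=rewrite | github.com/maciekzielonka1/cpsc490_code | speaker_diarization.py | create_all_segments
-- ===== SOURCE A (Python) =====
-- def create_all_segments(silent_segments_in_frames, last_frame):
--     all_segments = []
--     segments_for_embedding = []
--     chunk_start = 0
--     for segment in silent_segments_in_frames:
--         segment_start = segment[0]
--         segment_end = segment[1]
--         if chunk_start != segment_start:
--             all_segments.append((chunk_start, segment_start))
--             segments_for_embedding.append((chunk_start, segment_start))
--         all_segments.append(segment)
--         chunk_start = segment_end
--     if chunk_start != last_frame:
--         all_segments.append((chunk_start, last_frame))
--         segments_for_embedding.append((chunk_start, last_frame))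
--     return all_segments, segments_for_embedding
-- ===== SOURCE B (Python) =====
-- def create_all_segments(silent_segments_in_frames, last_frame):
--     # Gap derivation: pair each interval boundary with the next interval's start.
--     ends = [0] + [seg[1] for seg in silent_segments_in_frames]
--     starts = [seg[0] for seg in silent_segments_in_frames] + [last_frame]
--     gaps = [(p, n) if p != n else None for p, n in zip(ends, starts)]
--     all_segments = []
--     for gap, seg in zip(gaps, silent_segments_in_frames):
--         if gap is not None:
--             all_segments.append(gap)
--         all_segments.append(seg)
--     if gaps[-1] is not None:
--         all_segments.append(gaps[-1])
--     segments_for_embedding = [g for g in gaps if g is not None]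
--     return all_segments, segments_for_embedding
-- ===== Notes on version B (the rewrite author's own statement) =====
-- stated objective: alternative
-- what changed: Replaces A's single interleaved loop with a chunk_start accumulator by a gap-derivation pass (zipping shifted boundary lists into optional gaps) followed by a merge of gaps with the original segments and a filter for the embedding list.
import Mathlib
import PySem

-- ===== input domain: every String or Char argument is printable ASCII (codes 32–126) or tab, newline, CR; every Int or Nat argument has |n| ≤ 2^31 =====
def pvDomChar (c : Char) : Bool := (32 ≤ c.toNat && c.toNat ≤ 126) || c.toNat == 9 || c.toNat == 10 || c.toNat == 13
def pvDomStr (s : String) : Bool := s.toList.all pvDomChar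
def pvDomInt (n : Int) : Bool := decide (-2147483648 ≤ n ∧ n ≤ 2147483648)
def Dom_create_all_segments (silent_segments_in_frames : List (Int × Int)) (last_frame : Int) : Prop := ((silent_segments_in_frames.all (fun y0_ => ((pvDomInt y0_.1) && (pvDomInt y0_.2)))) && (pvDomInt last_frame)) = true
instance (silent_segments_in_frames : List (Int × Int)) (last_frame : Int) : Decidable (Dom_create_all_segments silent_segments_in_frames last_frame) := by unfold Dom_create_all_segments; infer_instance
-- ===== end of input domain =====

-- B rewrites A's interleaved bookkeeping loop as a gap-derivation pass (zip of shifted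
-- boundary lists) followed by a merge with the original segments; alternative decomposition,
-- same cost, proved to return the same pair.

-- ===== PORT A =====
-- loop body of A's for-loop; state = (all_segments, segments_for_embedding, chunk_start)
def pvStepA (acc : List (Int × Int) × List (Int × Int) × Int) (seg : Int × Int) :
    List (Int × Int) × List (Int × Int) × Int :=
  let segment_start := seg.1
  let segment_end := seg.2
  let p :=
    if acc.2.2 ≠ segment_start then
      (acc.1 ++ [(acc.2.2, segment_start)], acc.2.1 ++ [(acc.2.2, segment_start)])
    else (acc.1, acc.2.1)
  (p.1 ++ [seg], p.2, segment_end)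

def create_all_segments (silent_segments_in_frames : List (Int × Int)) (last_frame : Int) : (List (Int × Int)) × (List (Int × Int)) :=
  let st := silent_segments_in_frames.foldl pvStepA (([] : List (Int × Int)), ([] : List (Int × Int)), (0 : Int))
  if st.2.2 ≠ last_frame then (st.1 ++ [(st.2.2, last_frame)], st.2.1 ++ [(st.2.2, last_frame)])
  else (st.1, st.2.1)

-- ===== PORT B =====
-- loop body of B's merge loop over zip(gaps, silent_segments_in_frames)
def pvStepB (acc : List (Int × Int)) (gs : Option (Int × Int) × (Int × Int)) : List (Int × Int) :=
  (match gs.1 with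
   | some gp => acc ++ [gp]
   | none => acc) ++ [gs.2]

def create_all_segments_alt (silent_segments_in_frames : List (Int × Int)) (last_frame : Int) : (List (Int × Int)) × (List (Int × Int)) :=
  let ends := (0 : Int) :: silent_segments_in_frames.map (fun seg => seg.2)
  let starts := silent_segments_in_frames.map (fun seg => seg.1) ++ [last_frame]
  let gaps := (ends.zip starts).map (fun pn => if pn.1 ≠ pn.2 then some pn else none)
  let all_segments := (gaps.zip silent_segments_in_frames).foldl pvStepB []
  let all_segments2 :=
    match gaps.getLast? with
    | some (some gp) => all_segments ++ [gp]
    | _ => all_segments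
  (all_segments2, gaps.filterMap id)

-- ===== PRECONDITION & SPEC =====
def Spec_create_all_segments (silent_segments_in_frames : List (Int × Int)) (last_frame : Int) (out : (List (Int × Int)) × (List (Int × Int))) : Prop := out = create_all_segments_alt silent_segments_in_frames last_frame
instance (silent_segments_in_frames : List (Int × Int)) (last_frame : Int) (out : (List (Int × Int)) × (List (Int × Int))) : Decidable (Spec_create_all_segments silent_segments_in_frames last_frame out) := by unfold Spec_create_all_segments; infer_instance

-- ===== CLAIM (what is proved, stated in full; the proofs are below) =====
def Claim_equal_create_all_segments : Prop := ∀ (silent_segments_in_frames : List (Int × Int)) (last_frame : Int), Dom_create_all_segments silent_segments_in_frames last_frame → Spec_create_all_segments silent_segments_in_frames last_frame (create_all_segments silent_segments_in_frames last_frame)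

-- ===== LEMMAS AND PROOFS =====

-- reference function: A's result when the loop starts with chunk_start = cs
def pvRef : List (Int × Int) → Int → Int → (List (Int × Int)) × (List (Int × Int))
  | [], cs, lf => if cs ≠ lf then ([(cs, lf)], [(cs, lf)]) else ([], [])
  | (s, e) :: rest, cs, lf =>
      let r := pvRef rest e lf
      if cs ≠ s then ((cs, s) :: (s, e) :: r.1, (cs, s) :: r.2)
      else ((s, e) :: r.1, r.2)

lemma pvA_state (lf : Int) :
    ∀ (ss : List (Int × Int)) (all emb : List (Int × Int)) (cs : Int),
      (let st := ss.foldl pvStepA (all, emb, cs)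
       if st.2.2 ≠ lf then (st.1 ++ [(st.2.2, lf)], st.2.1 ++ [(st.2.2, lf)])
       else (st.1, st.2.1))
      = (all ++ (pvRef ss cs lf).1, emb ++ (pvRef ss cs lf).2) := by
  intro ss
  induction ss with
  | nil =>
      intro all emb cs
      simp only [List.foldl, pvRef]
      split_ifs <;> simp
  | cons hd tl ih =>
      intro all emb cs
      obtain ⟨s, e⟩ := hd
      simp only [List.foldl, pvStepA, pvRef]
      by_cases h : cs = s
      · simp only [h, ne_eq, not_true_eq_false, if_false]
        have := ih (all ++ [(s, e)]) emb e
        simp only [this]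
        simp
      · simp only [ne_eq, h, not_false_eq_true, if_true]
        have := ih (all ++ [(cs, s)] ++ [(s, e)]) (emb ++ [(cs, s)]) e
        simp only [this]
        simp

lemma pvA_eq (ss : List (Int × Int)) (lf : Int) :
    create_all_segments ss lf = pvRef ss 0 lf := by
  have := pvA_state lf ss [] [] 0
  simpa [create_all_segments] using this

-- B's gap list when the first previous-end is cs
def pvGaps (cs : Int) (ss : List (Int × Int)) (lf : Int) : List (Option (Int × Int)) :=
  ((cs :: ss.map (fun seg => seg.2)).zip (ss.map (fun seg => seg.1) ++ [lf])).map
    (fun pn => if pn.1 ≠ pn.2 then some pn else none)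

lemma pvGaps_nil (cs lf : Int) :
    pvGaps cs [] lf = [if cs ≠ lf then some (cs, lf) else none] := by
  simp [pvGaps]

lemma pvGaps_cons (cs lf s e : Int) (rest : List (Int × Int)) :
    pvGaps cs ((s, e) :: rest) lf
      = (if cs ≠ s then some (cs, s) else none) :: pvGaps e rest lf := by
  simp [pvGaps]

lemma pvGaps_ne_nil (cs lf : Int) (ss : List (Int × Int)) : pvGaps cs ss lf ≠ [] := by
  cases ss with
  | nil => simp [pvGaps_nil]
  | cons hd tl => obtain ⟨s, e⟩ := hd; simp [pvGaps_cons]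

lemma pvStepB_shift (l : List (Option (Int × Int) × (Int × Int))) :
    ∀ acc, l.foldl pvStepB acc = acc ++ l.foldl pvStepB [] := by
  induction l with
  | nil => simp
  | cons hd tl ih =>
      intro acc
      simp only [List.foldl]
      rw [ih (pvStepB acc hd), ih (pvStepB [] hd)]
      simp [pvStepB]
      cases hd.1 <;> simp

lemma pvB_main (lf : Int) :
    ∀ (ss : List (Int × Int)) (cs : Int),
      ((match (pvGaps cs ss lf).getLast? with
        | some (some gp) => ((pvGaps cs ss lf).zip ss).foldl pvStepB [] ++ [gp]
        | _ => ((pvGaps cs ss lf).zip ss).foldl pvStepB []),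
       (pvGaps cs ss lf).filterMap id) = pvRef ss cs lf := by
  intro ss
  induction ss with
  | nil =>
      intro cs
      simp only [pvGaps_nil, pvRef]
      by_cases h : cs = lf <;> simp [h]
  | cons hd tl ih =>
      intro cs
      obtain ⟨s, e⟩ := hd
      rw [pvGaps_cons]
      have hne := pvGaps_ne_nil e lf tl
      have hlast : ((if cs ≠ s then some (cs, s) else none) :: pvGaps e tl lf).getLast?
          = (pvGaps e tl lf).getLast? := by
        cases hg : pvGaps e tl lf with
        | nil => exact absurd hg hne
        | cons a b => simp [List.getLast?]
      rw [hlast]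
      simp only [List.zip_cons_cons, List.foldl_cons]
      rw [pvStepB_shift _ (pvStepB [] _)]
      have hih := ih e
      simp only [pvRef]
      by_cases h : cs = s
      · simp only [h, ne_eq, not_true_eq_false, ite_false]
        rw [← hih]
        simp only [pvStepB, List.filterMap_cons]
        cases hg : (pvGaps e tl lf).getLast? with
        | none => simp
        | some v => cases v <;> simp
      · simp only [ne_eq, h, not_false_eq_true, ite_true]
        rw [← hih]
        simp only [pvStepB, List.filterMap_cons]
        cases hg : (pvGaps e tl lf).getLast? with
        | none => simp
        | some v => cases v <;> simp
  
lemma pvB_eq (ss : List (Int × Int)) (lf : Int) :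
    create_all_segments_alt ss lf = pvRef ss 0 lf := by
  have := pvB_main lf ss 0
  simpa [create_all_segments_alt, pvGaps] using this

-- ===== VERDICT (by name: the statement is the Claim_ definition above) =====
theorem create_all_segments_spec : Claim_equal_create_all_segments := by
  intro ss lf _
  unfold Spec_create_all_segments
  rw [pvA_eq, pvB_eq]
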